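-- pv_equiv track=rewrite | github.com/FierceOtter/USA-GunDeaths | Basics.py | homicide_race
-- ===== SOURCE A (Python) =====
-- def homicide_race(intents,races):
--     homicide_race_counts = {}
--     for idx,val in enumerate(races):
--         if val not in homicide_race_counts:
--             homicide_race_counts[val] = 0
--         if intents[idx] == 'Homicide':
--             homicide_race_counts[val]+=1
--     return homicide_race_counts
-- ===== SOURCE B (Python) =====
-- def homicide_race(intents, races):
--     # group-by-key formulation: distinct races in first-occurrence order,
--     # then an independent counting scan per key.
--     return {r: sum(1 for race, intent in zip(races, intents)
--                    if race == r and intent == 'Homicide')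
--             for r in dict.fromkeys(races)}
-- ===== Notes on version B (the rewrite author's own statement) =====
-- stated objective: alternative
-- what changed: Replaces A's single interleaved pass that maintains a mutable counter dict by a group-by-key formulation: dedupe the races into first-occurrence order, then compute each race's count with an independent scan over zip(races, intents); trades A's O(n) single pass for an O(k*n) per-key count with no mutable dict.
import Mathlib
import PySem

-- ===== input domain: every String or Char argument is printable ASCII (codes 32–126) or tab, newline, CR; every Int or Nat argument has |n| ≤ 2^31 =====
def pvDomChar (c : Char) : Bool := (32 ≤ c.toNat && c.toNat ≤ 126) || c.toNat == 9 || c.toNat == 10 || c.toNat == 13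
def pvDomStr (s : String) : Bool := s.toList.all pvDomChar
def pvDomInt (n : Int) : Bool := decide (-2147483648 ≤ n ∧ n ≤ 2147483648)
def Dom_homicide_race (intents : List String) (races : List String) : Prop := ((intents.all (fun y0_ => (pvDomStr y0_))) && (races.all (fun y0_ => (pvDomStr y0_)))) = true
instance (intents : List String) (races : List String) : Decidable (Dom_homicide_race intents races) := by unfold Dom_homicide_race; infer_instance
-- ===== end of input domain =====

-- B replaces A's single interleaved counting pass over a mutable dict by a group-by-key
-- formulation (dedupe keys, then an independent counting scan per key); objective: alternative.

-- ===== PORT A =====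
-- A: one pass over enumerate(races); per element insert key with 0 if absent, then increment on 'Homicide'.
def homicide_race (intents : List String) (races : List String) : List (String × Int) :=
  ((PySem.List.enumerate races).foldl
    (fun d p =>
      let d := if d.contains p.2 then d else d.insert p.2 0
      if PySem.List.pyGet? intents p.1 = some "Homicide" then d.modify p.2 0 (· + 1) else d)
    PySem.Dict.empty).items

-- ===== PORT B =====
-- B: distinct races in first-occurrence order (dict.fromkeys); for each such race,
-- sum(1 for race, intent in zip(races, intents) if race == r and intent == 'Homicide').
def homicide_race_alt (intents : List String) (races : List String) : List (String × Int) :=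
  (PySem.List.dedup races).map (fun r =>
    (r, (races.zip intents).foldl
          (fun acc p => if p.1 = r ∧ p.2 = "Homicide" then acc + 1 else acc) (0 : Int)))

-- ===== PRECONDITION & SPEC =====
-- Pre_ excludes exactly the inputs where A raises IndexError: races longer than intents.
def Pre_homicide_race (intents : List String) (races : List String) : Prop :=
  races.length ≤ intents.length
instance (intents : List String) (races : List String) : Decidable (Pre_homicide_race intents races) := by unfold Pre_homicide_race; infer_instance

def pvWitness_homicide_race : List String × List String :=
  (["Homicide", "Suicide", "Homicide"], ["White", "Black", "White"])

def Spec_homicide_race (intents : List String) (races : List String) (out : List (String × Int)) : Prop := out = homicide_race_alt intents races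
instance (intents : List String) (races : List String) (out : List (String × Int)) : Decidable (Spec_homicide_race intents races out) := by unfold Spec_homicide_race; infer_instance

-- ===== CLAIM (what is proved, stated in full; the proofs are below) =====
def Claim_equal_homicide_race : Prop := ∀ (intents : List String) (races : List String), Dom_homicide_race intents races → Pre_homicide_race intents races → Spec_homicide_race intents races (homicide_race intents races)

-- ===== LEMMAS AND PROOFS =====

-- homicide count of key k among the pairs of l (positions looked up in intents)
def hCount (intents : List String) (l : List (Int × String)) (k : String) : Int :=
  (((l.filter (fun p => decide (PySem.List.pyGet? intents p.1 = some "Homicide"))).map Prod.snd).count k : Int)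

theorem hCount_nil (intents : List String) (k : String) : hCount intents [] k = 0 := rfl

theorem hCount_cons (intents : List String) (p : Int × String) (t : List (Int × String)) (k : String) :
    hCount intents (p :: t) k =
      (if PySem.List.pyGet? intents p.1 = some "Homicide" then (if p.2 = k then 1 else 0) else 0)
        + hCount intents t k := by
  unfold hCount
  by_cases hc : PySem.List.pyGet? intents p.1 = some "Homicide"
  · by_cases hk : p.2 = k <;> simp [hc, hk, List.count_cons] <;> push_cast <;> ring
  · simp [hc]

-- the "if absent: d[r]=0" step does not change getD (w.r.t. default 0)
theorem ensure_getD (d : PySem.Dict String Int) (r k : String) :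
    (if d.contains r then d else d.insert r 0).getD k 0 = d.getD k 0 := by
  by_cases h : d.contains r = true
  · simp [h]
  · simp only [Bool.not_eq_true] at h
    rw [if_neg (by simp [h]), PySem.Dict.getD_insert]
    by_cases hk : k = r
    · subst hk
      rw [if_pos rfl, PySem.Dict.getD_of_not_contains d 0 h]
    · rw [if_neg hk]

theorem getD_foldA (intents : List String) (l : List (Int × String)) (d : PySem.Dict String Int) (k : String) :
    (l.foldl
      (fun d p =>
        let d := if d.contains p.2 then d else d.insert p.2 0
        if PySem.List.pyGet? intents p.1 = some "Homicide" then d.modify p.2 0 (· + 1) else d)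
      d).getD k 0 = d.getD k 0 + hCount intents l k := by
  induction l generalizing d with
  | nil => simp [hCount_nil]
  | cons p t ih =>
    rw [List.foldl_cons, ih, hCount_cons]
    by_cases hc : PySem.List.pyGet? intents p.1 = some "Homicide"
    · by_cases hk : p.2 = k
      · subst hk
        simp only [hc, if_true, PySem.Dict.getD_modify, ensure_getD, if_pos rfl]
        ring
      · simp only [hc, if_true, PySem.Dict.getD_modify, if_neg (Ne.symm hk)]
        rw [ensure_getD]
        simp [hk]
    · simp only [hc, if_false, ensure_getD]
      ring

-- the "if absent: d[r]=0" step is Set.add on the keys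
theorem ensure_keys (d : PySem.Dict String Int) (r : String) :
    (if d.contains r then d else d.insert r 0).keys = PySem.Set.add d.keys r := by
  by_cases h : d.contains r = true
  · rw [if_pos h, PySem.Set.add]
    rw [PySem.Dict.contains_iff_mem_keys] at h
    simp [h]
  · simp only [Bool.not_eq_true] at h
    rw [if_neg (by simp [h]), PySem.Dict.keys_insert_of_not_contains d 0 h, PySem.Set.add]
    have : ¬ r ∈ d.keys := fun hm => by
      rw [← PySem.Dict.contains_iff_mem_keys] at hm; simp [h] at hm
    simp [this]

theorem ensure_contains_self (d : PySem.Dict String Int) (r : String) :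
    (if d.contains r then d else d.insert r 0).contains r = true := by
  by_cases h : d.contains r = true
  · simp [h]
  · simp only [Bool.not_eq_true] at h
    simp [h, PySem.Dict.contains_insert]

theorem keys_foldA (intents : List String) (l : List (Int × String)) (d : PySem.Dict String Int) :
    (l.foldl
      (fun d p =>
        let d := if d.contains p.2 then d else d.insert p.2 0
        if PySem.List.pyGet? intents p.1 = some "Homicide" then d.modify p.2 0 (· + 1) else d)
      d).keys = PySem.Set.update d.keys (l.map Prod.snd) := by
  induction l generalizing d with
  | nil => simp [PySem.Set.update]
  | cons p t ih =>
    rw [List.foldl_cons, ih]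
    have hstep :
        (let d' := if d.contains p.2 then d else d.insert p.2 0
         if PySem.List.pyGet? intents p.1 = some "Homicide" then d'.modify p.2 0 (· + 1) else d').keys
          = PySem.Set.add d.keys p.2 := by
      by_cases hc : PySem.List.pyGet? intents p.1 = some "Homicide"
      · simp only [hc, if_true]
        rw [PySem.Dict.keys_modify,
          PySem.Dict.keys_insert_of_contains _ _ (ensure_contains_self d p.2),
          ensure_keys]
      · simp only [hc, if_false]
        exact ensure_keys d p.2
    rw [hstep]
    simp [PySem.Set.update]

theorem items_eq_keys_map (d : PySem.Dict String Int) (h : d.keys.Nodup) :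
    d.items = d.keys.map (fun k => (k, d.getD k 0)) := by
  have hk : d.keys = d.items.map Prod.fst := rfl
  rw [hk, List.map_map]
  apply List.ext_getElem (by simp)
  intro i h1 h2
  simp only [List.getElem_map, Function.comp]
  have hm : (d.items[i].1, d.items[i].2) ∈ d.items := by
    simpa using List.getElem_mem h1
  have := PySem.Dict.getD_of_mem_items d hm h 0
  exact Prod.ext rfl this.symm

-- B's counting fold equals the countP of its predicate
theorem foldB_eq_countP (l : List (String × String)) (r : String) (acc : Int) :
    l.foldl (fun acc p => if p.1 = r ∧ p.2 = "Homicide" then acc + 1 else acc) acc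
      = acc + (l.countP (fun p => decide (p.1 = r ∧ p.2 = "Homicide")) : Int) := by
  induction l generalizing acc with
  | nil => simp
  | cons p t ih =>
    rw [List.foldl_cons, ih, List.countP_cons]
    by_cases h : p.1 = r ∧ p.2 = "Homicide" <;> simp [h] <;> push_cast <;> ring

-- A's per-key homicide count, read off enumerate, equals B's count over the zip
theorem hCount_eq_zip_countP (intents : List String) (races : List String) (s : Nat)
    (h : s + races.length ≤ intents.length) (k : String) :
    hCount intents (PySem.List.enumerate races (s : Int)) k
      = ((races.zip (intents.drop s)).countP (fun p => decide (p.1 = k ∧ p.2 = "Homicide")) : Int) := by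
  induction races generalizing s with
  | nil => simp [PySem.List.enumerate_nil, hCount_nil]
  | cons r t ih =>
    have hs : s < intents.length := by simp at h; omega
    have hdrop : intents.drop s = intents[s] :: intents.drop (s + 1) :=
      List.drop_eq_getElem_cons hs
    rw [PySem.List.enumerate_cons, hCount_cons, hdrop]
    have hcast : ((s : Int) + 1) = ((s + 1 : Nat) : Int) := by push_cast; ring
    rw [hcast, ih (s + 1) (by simp at h ⊢; omega)]
    simp only [List.zip_cons_cons, List.countP_cons, PySem.List.pyGet?_natCast,
      List.getElem?_eq_getElem hs]
    by_cases hc : intents[s] = "Homicide"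
    · by_cases hk : r = k <;> simp [hc, hk] <;> push_cast <;> ring
    · simp [hc]

-- ===== VERDICT (by name: the statement is the Claim_ definition above) =====
theorem homicide_race_spec : Claim_equal_homicide_race := by
  intro intents races _ hpre
  unfold Spec_homicide_race homicide_race homicide_race_alt
  have hkeysA := keys_foldA intents (PySem.List.enumerate races) PySem.Dict.empty
  rw [PySem.List.map_snd_enumerate, PySem.Dict.keys_empty] at hkeysA
  have hupd : PySem.Set.update ([] : List String) races = PySem.Set.ofList races := by
    rw [PySem.Set.update, PySem.Set.ofList_eq_foldl]
  have hnodup : (PySem.Set.ofList races).Nodup := PySem.Set.nodup_ofList races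
  rw [items_eq_keys_map _ (by rw [hkeysA, hupd]; exact hnodup), hkeysA, hupd,
      PySem.List.dedup_eq_ofList]
  apply List.map_congr_left
  intro k _
  rw [getD_foldA, PySem.Dict.getD_empty, foldB_eq_countP]
  have h0 : (0 : Nat) + races.length ≤ intents.length := by simpa using hpre
  have := hCount_eq_zip_countP intents races 0 h0 k
  simp only [Nat.cast_zero, List.drop_zero] at this
  rw [this]
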